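-- pv_equiv track=rewrite | github.com/CaoHaoyuan/ECE285-Video-Image-Compression | HW1/main.py | unary_decode
-- ===== SOURCE A (Python) =====
-- def unary_decode(Input):
--     res = []
--     counter = 0
--     for element in Input:
--         if(element == 1):
--             counter += 1
--         else:
--             res.append(counter)
--             counter = 0
--     return res
-- ===== SOURCE B (Python) =====
-- def unary_decode(Input):
--     seps = [i for i, e in enumerate(Input) if e != 1]
--     res = []
--     prev = -1
--     for p in seps:
--         res.append(p - prev - 1)
--         prev = p
--     return res
-- ===== Notes on version B (the rewrite author's own statement) =====
-- stated objective: alternative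
-- what changed: Instead of one stateful counter loop, B first collects the indices of all non-1 separators, then produces each count by differencing consecutive separator positions (prev starting at -1).
import Mathlib
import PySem

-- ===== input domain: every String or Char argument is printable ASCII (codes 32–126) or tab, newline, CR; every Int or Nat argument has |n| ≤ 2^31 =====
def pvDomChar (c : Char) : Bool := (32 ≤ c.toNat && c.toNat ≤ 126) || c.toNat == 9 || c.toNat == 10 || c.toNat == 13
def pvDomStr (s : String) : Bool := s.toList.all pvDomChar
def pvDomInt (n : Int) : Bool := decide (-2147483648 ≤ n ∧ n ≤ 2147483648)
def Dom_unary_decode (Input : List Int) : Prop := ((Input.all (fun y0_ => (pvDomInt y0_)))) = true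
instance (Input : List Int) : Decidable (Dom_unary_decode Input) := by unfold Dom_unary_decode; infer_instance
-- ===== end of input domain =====

-- B replaces A's stateful counter loop by collecting separator indices and differencing
-- consecutive positions (objective: alternative decomposition; same O(n) cost).

-- ===== PORT A =====
-- one pass: count 1s, emit the counter at every non-1 element
def unary_decode (Input : List Int) : List Int :=
  (Input.foldl
    (fun (st : List Int × Int) element =>
      if element = 1 then (st.1, st.2 + 1) else (st.1 ++ [st.2], 0))
    ([], 0)).1

-- ===== PORT B =====
-- pass 1: indices of every non-1 element
def unary_decode_alt (Input : List Int) : List Int :=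
  let seps : List Int :=
    ((PySem.List.enumerate Input 0).filter (fun p => p.2 ≠ 1)).map (·.1)
  -- pass 2: difference consecutive separator positions, prev starts at -1
  (seps.foldl (fun (st : List Int × Int) p => (st.1 ++ [p - st.2 - 1], p)) ([], -1)).1

-- ===== PRECONDITION & SPEC =====
def Spec_unary_decode (Input : List Int) (out : List Int) : Prop := out = unary_decode_alt Input
instance (Input : List Int) (out : List Int) : Decidable (Spec_unary_decode Input out) := by unfold Spec_unary_decode; infer_instance

-- ===== CLAIM (what is proved, stated in full; the proofs are below) =====
def Claim_equal_unary_decode : Prop := ∀ (Input : List Int), Dom_unary_decode Input → Spec_unary_decode Input (unary_decode Input)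

-- ===== LEMMAS AND PROOFS =====

-- recursive view of B's differencing pass
def pvDiffs : List Int → Int → List Int
  | [], _ => []
  | p :: ps, prev => (p - prev - 1) :: pvDiffs ps p

theorem pvDiffs_foldl (seps : List Int) (acc : List Int) (prev : Int) :
    (seps.foldl (fun (st : List Int × Int) p => (st.1 ++ [p - st.2 - 1], p)) (acc, prev)).1
      = acc ++ pvDiffs seps prev := by
  induction seps generalizing acc prev with
  | nil => simp [pvDiffs]
  | cons p ps ih => simp [List.foldl, pvDiffs, ih, List.append_assoc]

def pvSeps (l : List Int) (i : Int) : List Int :=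
  ((PySem.List.enumerate l i).filter (fun p => p.2 ≠ 1)).map (·.1)

theorem pvMain (l : List Int) (i c : Int) (acc : List Int) :
    (l.foldl
      (fun (st : List Int × Int) element =>
        if element = 1 then (st.1, st.2 + 1) else (st.1 ++ [st.2], 0))
      (acc, c)).1
    = acc ++ pvDiffs (pvSeps l i) (i - c - 1) := by
  induction l generalizing i c acc with
  | nil => simp [pvSeps, pvDiffs, PySem.List.enumerate_nil]
  | cons e rest ih =>
    by_cases he : e = 1
    · subst he
      rw [List.foldl_cons, if_pos rfl, ih (i + 1) (c + 1) acc]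
      have h1 : i + 1 - (c + 1) - 1 = i - c - 1 := by ring
      rw [h1]
      simp [pvSeps, PySem.List.enumerate_cons]
    · rw [List.foldl_cons, if_neg he, ih (i + 1) 0 (acc ++ [c])]
      have h2 : i - (i - c - 1) - 1 = c := by ring
      simp [pvSeps, PySem.List.enumerate_cons, he, pvDiffs, h2, List.append_assoc]

-- ===== VERDICT (by name: the statement is the Claim_ definition above) =====
theorem unary_decode_spec : Claim_equal_unary_decode := by
  intro Input _
  unfold Spec_unary_decode unary_decode unary_decode_alt
  rw [pvMain Input 0 0 [], pvDiffs_foldl]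
  simp [pvSeps]
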